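-- pv_equiv track=rewrite | github.com/piotrhelm/NESTFUL | data_v2/executable_functions/py_code_file_4053.py | generate_powers_of_two
-- ===== SOURCE A (Python) =====
-- from typing import List
--
-- def generate_powers_of_two(maximum: int) -> List[int]:
--
--     """Generates a list of integer numbers that are powers of two, starting from 1 and ending at a specified maximum value.
--
--
--
--     Args:
--
--         maximum: The maximum value.
--
--
--
--     Returns:
--
--         A list of powers of two.
--
--     """
--
--     exponent = 0
--
--     powers_of_two = []
--
--     while exponent < maximum:
--
--         power = 2 ** exponent
--
--         if power > maximum:
--
--             break
--
--         powers_of_two.append(power)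
--
--         exponent += 1
--
--     return powers_of_two
-- ===== SOURCE B (Python) =====
-- from typing import List
--
-- def generate_powers_of_two(maximum: int) -> List[int]:
--     """Generates the powers of two from 1 up to a specified maximum value."""
--     if maximum < 1:
--         return []
--     return [1 << i for i in range(maximum.bit_length())]
-- ===== Notes on version B (the rewrite author's own statement) =====
-- stated objective: idiomatic
-- what changed: Replaces the probe-and-break while loop with a closed form: the number of powers of two not exceeding maximum is maximum.bit_length(), so B returns [1 << i for i in range(bit_length)] directly.
import Mathlib
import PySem

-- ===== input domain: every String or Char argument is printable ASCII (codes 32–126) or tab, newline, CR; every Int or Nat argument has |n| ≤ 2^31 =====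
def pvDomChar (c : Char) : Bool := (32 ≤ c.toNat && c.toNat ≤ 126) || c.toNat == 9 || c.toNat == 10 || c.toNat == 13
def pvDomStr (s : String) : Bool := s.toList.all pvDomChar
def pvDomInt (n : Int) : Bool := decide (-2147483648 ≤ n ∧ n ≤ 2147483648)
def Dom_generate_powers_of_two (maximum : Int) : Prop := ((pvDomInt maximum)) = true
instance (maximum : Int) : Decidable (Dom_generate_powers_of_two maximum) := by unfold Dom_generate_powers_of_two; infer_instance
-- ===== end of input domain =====

-- B replaces A's probe-and-break loop with a closed-form list driven by bit length (idiomatic; same asymptotic cost).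


-- ===== PORT A =====
-- the while loop: state (exponent, powers_of_two); exponent stays ≥ 0, so 2 ** exponent = 2 ^ exponent.toNat exactly
def pvLoopA (maximum : Int) (exponent : Int) (powers_of_two : List Int) : List Int :=
  if exponent < maximum then
    let power : Int := 2 ^ exponent.toNat
    if power > maximum then powers_of_two
    else pvLoopA maximum (exponent + 1) (powers_of_two ++ [power])
  else powers_of_two
termination_by (maximum - exponent).toNat
decreasing_by omega

def generate_powers_of_two (maximum : Int) : List Int :=
  pvLoopA maximum 0 []

-- ===== PORT B =====
-- maximum.bit_length() for maximum ≥ 1 is Nat.size maximum.toNat; 1 << i is 2 ^ i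
def generate_powers_of_two_alt (maximum : Int) : List Int :=
  if maximum < 1 then []
  else (List.range (Nat.size maximum.toNat)).map (fun i => ((2:Int) ^ i))

-- ===== PRECONDITION & SPEC =====
def Spec_generate_powers_of_two (maximum : Int) (out : List Int) : Prop := out = generate_powers_of_two_alt maximum
instance (maximum : Int) (out : List Int) : Decidable (Spec_generate_powers_of_two maximum out) := by unfold Spec_generate_powers_of_two; infer_instance

-- ===== CLAIM (what is proved, stated in full; the proofs are below) =====
def Claim_equal_generate_powers_of_two : Prop := ∀ (maximum : Int), Dom_generate_powers_of_two maximum → Spec_generate_powers_of_two maximum (generate_powers_of_two maximum)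

-- ===== LEMMAS AND PROOFS =====

-- For 1 ≤ m, bit length is at most m: n = size m satisfies n ≤ 2^(n-1) ≤ m.
theorem pv_size_le_self {m : ℕ} (hm : 1 ≤ m) : Nat.size m ≤ m := by
  have h1 : 1 ≤ Nat.size m := by
    have : 0 < Nat.size m := Nat.lt_size.mpr (by simpa using hm)
    omega
  have h2 : (2:ℕ) ^ (Nat.size m - 1) ≤ m := Nat.lt_size.mp (by omega)
  have h3 : Nat.size m - 1 < 2 ^ (Nat.size m - 1) := Nat.lt_two_pow_self
  omega

-- Loop invariant: if e + k = size m (with m = maximum.toNat, maximum ≥ 1),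
-- the loop starting at exponent e appends powers 2^e, …, 2^(size m - 1).
theorem pvLoopA_inv (m : ℕ) (hm : 1 ≤ m) (k e : ℕ) (he : e + k = Nat.size m)
    (acc : List Int) :
    pvLoopA (m : Int) (e : Int) acc
      = acc ++ (List.range' e k).map (fun i => ((2:Int) ^ i)) := by
  induction k generalizing e acc with
  | zero =>
    -- e = size m: either e = m (loop guard fails) or 2^e > m (break)
    rw [pvLoopA]
    have hsz : e = Nat.size m := by omega
    by_cases hlt : (e : Int) < (m : Int)
    · have hpow : (m : ℕ) < 2 ^ e := by rw [hsz]; exact Nat.lt_size_self m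
      have htn : (e : Int).toNat = e := Int.toNat_natCast e
      simp only [hlt, if_true, htn]
      have : ((2:Int) ^ e > (m : Int)) := by exact_mod_cast hpow
      simp [this]
    · simp [hlt]
  | succ k ih =>
    rw [pvLoopA]
    have hn1 : 1 ≤ Nat.size m := by omega
    have hsle : Nat.size m ≤ m := pv_size_le_self hm
    have hlt : (e : Int) < (m : Int) := by exact_mod_cast (by omega : e < m)
    have hpow : (2:ℕ) ^ e ≤ m := Nat.lt_size.mp (by omega)
    have htn : (e : Int).toNat = e := Int.toNat_natCast e
    simp only [hlt, if_true, htn]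
    have hnotgt : ¬ ((2:Int) ^ e > (m : Int)) := by
      push Not; exact_mod_cast hpow
    simp only [hnotgt, if_false]
    have := ih (e + 1) (by omega) (acc ++ [(2:Int) ^ e])
    push_cast at this ⊢
    rw [this, List.range'_succ, List.map_cons]
    simp

-- ===== VERDICT (by name: the statement is the Claim_ definition above) =====
theorem generate_powers_of_two_spec : Claim_equal_generate_powers_of_two := by
  intro maximum _
  unfold Spec_generate_powers_of_two generate_powers_of_two generate_powers_of_two_alt
  by_cases h : maximum < 1
  · rw [pvLoopA]
    have : ¬ ((0:Int) < maximum) := by omega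
    simp [this, h]
  · have hm1 : 1 ≤ maximum := by omega
    have hcast : ((maximum.toNat : ℕ) : Int) = maximum := Int.toNat_of_nonneg (by omega)
    have hm : 1 ≤ maximum.toNat := by omega
    have := pvLoopA_inv maximum.toNat hm (Nat.size maximum.toNat) 0 (by omega) []
    rw [hcast] at this
    simp only [h, if_false]
    simpa [List.range_eq_range'] using this
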